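-- pv_equiv track=rewrite | github.com/abhisheksoam/coding-exercise | coding_ninjas/amazon/solution.py | countPositiveNegativePairs
-- ===== SOURCE A (Python) =====
-- def countPositiveNegativePairs(arr, n):
--     freq_map = {}
--     for element in arr:
--         freq_map[element] = freq_map.get(element, 0) + 1
--     ans = 0
--     for element in arr:
--         element_frequency = freq_map.get(element, 0)
--         negative_element_frequency = freq_map.get(-element, 0)
--         ans = ans + element_frequency * negative_element_frequency
--         try:
--             del freq_map[element]
--         except:
--             pass
--         try:
--             del freq_map[-element]
--         except:
--             pass
--     return ans
-- ===== SOURCE B (Python) =====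
-- def countPositiveNegativePairs(arr, n):
--     counts = {}
--     for x in arr:
--         counts[x] = counts.get(x, 0) + 1
--     ans = counts.get(0, 0) ** 2
--     for k, cnt in counts.items():
--         if k > 0:
--             ans += cnt * counts.get(-k, 0)
--     return ans
-- ===== Notes on version B (the rewrite author's own statement) =====
-- stated objective: simpler
-- what changed: B makes one pass over the distinct keys of the frequency map with a positivity filter plus a closed-form count(0)**2 term for zero, instead of A's second scan over all of arr that avoids double counting by deleting processed keys from the map under try/except.
import Mathlib
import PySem

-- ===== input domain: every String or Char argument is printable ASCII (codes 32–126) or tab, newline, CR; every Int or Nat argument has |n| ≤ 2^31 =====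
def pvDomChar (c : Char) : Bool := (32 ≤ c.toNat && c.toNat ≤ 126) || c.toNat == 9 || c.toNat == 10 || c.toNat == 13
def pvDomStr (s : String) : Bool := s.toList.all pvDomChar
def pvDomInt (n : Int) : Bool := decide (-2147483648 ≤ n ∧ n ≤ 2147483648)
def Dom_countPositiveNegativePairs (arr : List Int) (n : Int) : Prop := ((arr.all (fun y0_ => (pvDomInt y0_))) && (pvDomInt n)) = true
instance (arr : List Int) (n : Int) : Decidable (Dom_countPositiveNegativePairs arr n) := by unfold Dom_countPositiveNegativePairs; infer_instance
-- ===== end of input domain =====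

-- B replaces A's arr-rescan with try/except deletions by one pass over the distinct keys of the
-- frequency map with a positivity filter, plus a count(0)^2 term for zero (simpler; measured faster).

-- ===== PORT A =====
-- A's second loop: for element in arr: ans += freq[element]*freq[-element]; del freq[element]
-- and del freq[-element] (try/except pass = erase, a no-op when the key is absent).
def pvLoopA : PySem.Dict Int Int → List Int → Int → Int
  | _, [], ans => ans
  | d, element :: rest, ans =>
      pvLoopA ((d.erase element).erase (-element)) rest
        (ans + d.getD element 0 * d.getD (-element) 0)

def countPositiveNegativePairs (arr : List Int) (n : Int) : Int :=
  let freq_map := arr.foldl (fun d element => d.insert element (d.getD element 0 + 1)) PySem.Dict.empty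
  pvLoopA freq_map arr 0

-- ===== PORT B =====
def countPositiveNegativePairs_alt (arr : List Int) (n : Int) : Int :=
  let counts := arr.foldl (fun d x => d.insert x (d.getD x 0 + 1)) PySem.Dict.empty
  counts.items.foldl
    (fun ans kc => if kc.1 > 0 then ans + kc.2 * counts.getD (-kc.1) 0 else ans)
    (counts.getD 0 0 ^ 2)

-- ===== PRECONDITION & SPEC =====
def Spec_countPositiveNegativePairs (arr : List Int) (n : Int) (out : Int) : Prop := out = countPositiveNegativePairs_alt arr n
instance (arr : List Int) (n : Int) (out : Int) : Decidable (Spec_countPositiveNegativePairs arr n out) := by unfold Spec_countPositiveNegativePairs; infer_instance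

-- ===== CLAIM (what is proved, stated in full; the proofs are below) =====
def Claim_equal_countPositiveNegativePairs : Prop := ∀ (arr : List Int) (n : Int), Dom_countPositiveNegativePairs arr n → Spec_countPositiveNegativePairs arr n (countPositiveNegativePairs arr n)

-- ===== LEMMAS AND PROOFS =====

theorem pv_get?_erase {ν : Type} (d : PySem.Dict Int ν) (a k : Int) :
    (d.erase a).get? k = if k = a then none else d.get? k := by
  obtain ⟨l⟩ := d
  simp only [PySem.Dict.erase, PySem.Dict.get?]
  by_cases hk : k = a
  · subst hk
    rw [if_pos rfl, List.find?_eq_none.mpr, Option.map_none]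
    intro x hx
    rw [List.mem_filter] at hx
    simpa using hx.2
  · rw [if_neg hk, List.find?_filter]
    have hpred : (fun (p : Int × ν) => decide ((!p.1 == a) = true ∧ (p.1 == k) = true))
        = fun (p : Int × ν) => p.1 == k := by
      funext p
      by_cases hpa : p.1 = a
      · have hak : a ≠ k := fun h => hk h.symm
        simp [hpa, hak]
      · by_cases hpk : p.1 = k <;> simp [hpa, hpk, hk]
    rw [hpred]

theorem pv_getD_erase (d : PySem.Dict Int Int) (a k : Int) :
    (d.erase a).getD k 0 = if k = a then 0 else d.getD k 0 := by
  simp only [PySem.Dict.getD, pv_get?_erase]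
  split_ifs <;> rfl

-- class representatives: first occurrence of each {x, -x} class not already covered by E
def pvReps : List Int → List Int → List Int
  | [], _ => []
  | x :: xs, E => if x ∈ E then pvReps xs E else x :: pvReps xs (x :: -x :: E)

theorem pvLoopA_eq (c : Int → Int) :
    ∀ (rest E : List Int) (d : PySem.Dict Int Int) (ans : Int),
      (∀ k, d.getD k 0 = if k ∈ E then 0 else c k) →
      (∀ k, k ∈ E → -k ∈ E) →
      pvLoopA d rest ans = ans + ((pvReps rest E).map (fun x => c x * c (-x))).sum := by
  intro rest
  induction rest with
  | nil => intro E d ans _ _; simp [pvLoopA, pvReps]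
  | cons x xs ih =>
    intro E d ans hd hcl
    by_cases hx : x ∈ E
    · have h1 : d.getD x 0 = 0 := by rw [hd]; simp [hx]
      have hinv : ∀ k, ((d.erase x).erase (-x)).getD k 0 = if k ∈ E then 0 else c k := by
        intro k
        rw [pv_getD_erase, pv_getD_erase, hd]
        by_cases hk1 : k = -x
        · simp [hk1, hcl x hx]
        · by_cases hk2 : k = x
          · simp [hk2, hx]
          · simp [hk1, hk2]
      have hrep : pvReps (x :: xs) E = pvReps xs E := by simp [pvReps, hx]
      rw [show pvLoopA d (x :: xs) ans
            = pvLoopA ((d.erase x).erase (-x)) xs (ans + d.getD x 0 * d.getD (-x) 0) from rfl,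
          h1, zero_mul, add_zero, hrep]
      exact ih E _ ans hinv hcl
    · have hnx : (-x) ∉ E := by
        intro h; exact hx (by simpa using hcl _ h)
      have h1 : d.getD x 0 = c x := by rw [hd]; simp [hx]
      have h2 : d.getD (-x) 0 = c (-x) := by rw [hd]; simp [hnx]
      have hcl' : ∀ k, k ∈ (x :: -x :: E) → -k ∈ (x :: -x :: E) := by
        intro k hk
        simp only [List.mem_cons] at hk ⊢
        rcases hk with h | h | h
        · subst h; simp
        · subst h; simp
        · simp [hcl k h]
      have hinv : ∀ k, ((d.erase x).erase (-x)).getD k 0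
          = if k ∈ (x :: -x :: E) then 0 else c k := by
        intro k
        rw [pv_getD_erase, pv_getD_erase, hd]
        by_cases hk1 : k = -x
        · simp [hk1]
        · by_cases hk2 : k = x
          · simp [hk2]
          · by_cases hk3 : k ∈ E <;> simp [hk1, hk2, hk3]
      rw [show pvLoopA d (x :: xs) ans
            = pvLoopA ((d.erase x).erase (-x)) xs (ans + d.getD x 0 * d.getD (-x) 0) from rfl,
          ih (x :: -x :: E) _ _ hinv hcl', h1, h2]
      simp only [pvReps, if_neg hx, List.map_cons, List.sum_cons]
      ring

theorem pvReps_abs :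
    ∀ (l E : List Int), (∀ k ∈ E, -k ∈ E) →
      ((pvReps l E).map (fun x => |x|)).Nodup ∧
      (∀ m, m ∈ (pvReps l E).map (fun x => |x|) ↔
        (m ∈ l.map (fun x => |x|) ∧ m ∉ E.map (fun x => |x|))) := by
  intro l
  induction l with
  | nil => intro E _; simp [pvReps]
  | cons x xs ih =>
    intro E hcl
    by_cases hx : x ∈ E
    · obtain ⟨hnd, hmem⟩ := ih E hcl
      refine ⟨by simpa [pvReps, hx] using hnd, ?_⟩
      intro m
      have habs : |x| ∈ E.map (fun x => |x|) := List.mem_map.mpr ⟨x, hx, rfl⟩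
      simp only [pvReps, if_pos hx, hmem, List.map_cons, List.mem_cons]
      constructor
      · rintro ⟨h1, h2⟩; exact ⟨Or.inr h1, h2⟩
      · rintro ⟨h1 | h1, h2⟩
        · exact absurd (h1 ▸ habs) h2
        · exact ⟨h1, h2⟩
    · have hcl' : ∀ k ∈ (x :: -x :: E), -k ∈ (x :: -x :: E) := by
        intro k hk
        simp only [List.mem_cons] at hk ⊢
        rcases hk with h | h | h
        · subst h; simp
        · subst h; simp
        · simp [hcl k h]
      obtain ⟨hnd, hmem⟩ := ih (x :: -x :: E) hcl'
      have hxE' : |x| ∈ (x :: -x :: E).map (fun x => |x|) := by simp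
      have hxnotE : |x| ∉ E.map (fun y => |y|) := by
        intro h
        obtain ⟨y, hy, hxy⟩ := List.mem_map.mp h
        rcases abs_eq_abs.mp hxy with h1 | h1
        · exact hx (h1 ▸ hy)
        · exact hx (by simpa [h1] using hcl y hy)
      have hE' : ∀ m, m ∈ (x :: -x :: E).map (fun x => |x|) ↔ (m = |x| ∨ m ∈ E.map (fun x => |x|)) := by
        intro m; simp [eq_comm, abs_neg]
      constructor
      · simp only [pvReps, if_neg hx, List.map_cons, List.nodup_cons]
        refine ⟨fun h => ?_, hnd⟩
        exact ((hmem |x|).mp h).2 hxE'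
      · intro m
        simp only [pvReps, if_neg hx, List.map_cons, List.mem_cons]
        rw [hmem m]
        rw [show (m ∈ List.map (fun x => |x|) (x :: -x :: E))
              = (m = |x| ∨ m ∈ List.map (fun x => |x|) E) from propext (hE' m)]
        by_cases hm : m = |x|
        · simp [hm, hxnotE]
        · simp only [hm, false_or]

-- fold with a positivity filter = sum over the filtered list
theorem pv_foldl_filter_sum (g : Int → Int) :
    ∀ (l : List Int) (init : Int),
      l.foldl (fun ans k => if k > 0 then ans + g k else ans) init
        = init + ((l.filter (fun k => decide (k > 0))).map g).sum := by
  intro l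
  induction l with
  | nil => simp
  | cons a l ih =>
    intro init
    by_cases ha : a > 0
    · rw [List.foldl_cons, if_pos ha, ih,
        List.filter_cons_of_pos (by simpa using ha), List.map_cons, List.sum_cons]
      ring
    · simp [List.foldl_cons, ha, ih]

theorem pv_alt_eq (arr : List Int) (n : Int) :
    countPositiveNegativePairs_alt arr n
      = ((arr.count 0 : Int)) ^ 2
        + (((PySem.List.dedup arr).filter (fun k => decide (k > 0))).map
            (fun k => (arr.count k : Int) * (arr.count (-k) : Int))).sum := by
  simp only [countPositiveNegativePairs_alt, PySem.Dict.foldl_insert_getD_add_one_eq_counter,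
    PySem.Dict.items_counter, PySem.Dict.getD_counter, List.foldl_map,
    ← PySem.List.dedup_eq_ofList]
  rw [pv_foldl_filter_sum]

theorem pv_a_eq (arr : List Int) (n : Int) :
    countPositiveNegativePairs arr n
      = ((pvReps arr []).map (fun x => (arr.count x : Int) * (arr.count (-x) : Int))).sum := by
  simp only [countPositiveNegativePairs]
  rw [pvLoopA_eq (fun k => (arr.count k : Int)) arr [] _ 0 ?_ (by simp)]
  · simp
  · intro k
    simp [PySem.Dict.getD_foldl_insert_add_one, PySem.Dict.getD_empty]

theorem pv_sum_eq (arr : List Int) :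
    ((pvReps arr []).map (fun x => (arr.count x : Int) * (arr.count (-x) : Int))).sum
      = ((arr.count 0 : Int)) ^ 2
        + (((PySem.List.dedup arr).filter (fun k => decide (k > 0))).map
            (fun k => (arr.count k : Int) * (arr.count (-k) : Int))).sum := by
  set f : Int → Int := fun x => (arr.count x : Int) * (arr.count (-x) : Int) with hf
  have hfabs : ∀ x, f x = f |x| := by
    intro x
    rcases abs_choice x with h | h
    · rw [h]
    · rw [h]; simp only [hf, neg_neg]; ring
  obtain ⟨hnd, hmem⟩ := pvReps_abs arr [] (by simp)
  -- A's sum as a Finset sum over T = the set of absolute values of arr's elements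
  have h1 : ((pvReps arr []).map f).sum = (((pvReps arr []).map (fun x => |x|)).map f).sum := by
    rw [List.map_map]
    exact congrArg List.sum (List.map_congr_left fun x _ => hfabs x)
  set L : List Int := (pvReps arr []).map (fun x => |x|) with hL
  have h2 : (L.map f).sum = L.toFinset.sum f := (List.sum_toFinset f hnd).symm
  set T : Finset Int := L.toFinset with hT
  have hTmem : ∀ m, m ∈ T ↔ ∃ x ∈ arr, |x| = m := by
    intro m
    rw [hT, List.mem_toFinset, hL, hmem]
    simp
  -- B's sum as a Finset sum over the positive elements of arr
  set Dp : List Int := (PySem.List.dedup arr).filter (fun k => decide (k > 0)) with hDp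
  have hDpnd : Dp.Nodup := (PySem.List.nodup_dedup arr).filter _
  have h3 : (Dp.map f).sum = Dp.toFinset.sum f := (List.sum_toFinset f hDpnd).symm
  have hDpmem : ∀ m, m ∈ Dp.toFinset ↔ (m ∈ arr ∧ m > 0) := by
    intro m
    rw [List.mem_toFinset, hDp, List.mem_filter, PySem.List.mem_dedup]
    simp
  -- split T into positives and the rest (only 0 can be non-positive in T)
  have hsplit := Finset.sum_filter_add_sum_filter_not T (fun m => m > 0) f
  have hpos : (T.filter (fun m => m > 0)).sum f = Dp.toFinset.sum f := by
    symm
    apply Finset.sum_subset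
    · intro k hk
      rw [hDpmem] at hk
      rw [Finset.mem_filter, hTmem]
      exact ⟨⟨k, hk.1, abs_of_pos hk.2⟩, hk.2⟩
    · intro m hm hnotm
      rw [Finset.mem_filter] at hm
      have hmarr : m ∉ arr := by
        intro h; exact hnotm (by rw [hDpmem]; exact ⟨h, hm.2⟩)
      simp [List.count_eq_zero.mpr hmarr]
  have hzero : (T.filter (fun m => ¬ m > 0)).sum f = ((arr.count 0 : Int)) ^ 2 := by
    have hone : T.filter (fun m => ¬ m > 0) = if (0 : Int) ∈ T then {0} else ∅ := by
      ext m
      constructor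
      · intro hm
        rw [Finset.mem_filter] at hm
        have hm0 : m = 0 := by
          obtain ⟨x, _, hxm⟩ := (hTmem m).mp hm.1
          have := abs_nonneg x
          omega
        subst hm0
        simp [hm.1]
      · intro hm
        split_ifs at hm with h0
        · rw [Finset.mem_singleton] at hm
          subst hm
          rw [Finset.mem_filter]
          exact ⟨h0, by omega⟩
        · exact absurd hm (Finset.notMem_empty m)
    rw [hone]
    split_ifs with h0
    · simp only [Finset.sum_singleton, hf, neg_zero]
      ring
    · have h0arr : (0 : Int) ∉ arr := by
        intro h; exact h0 ((hTmem 0).mpr ⟨0, h, rfl⟩)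
      rw [List.count_eq_zero.mpr h0arr]
      simp
  rw [h1, h2, ← hsplit, hpos, hzero, ← h3]
  ring

-- ===== VERDICT (by name: the statement is the Claim_ definition above) =====
theorem countPositiveNegativePairs_spec : Claim_equal_countPositiveNegativePairs := by
  intro arr n _
  unfold Spec_countPositiveNegativePairs
  rw [pv_a_eq, pv_sum_eq, pv_alt_eq]
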